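-- pv_equiv track=rewrite | github.com/miguelsalva/adventofcode | 2022/day01/day01.py | top_max3_list
-- ===== SOURCE A (Python) =====
-- def top_max3_list(lista):
--   max1 = 0
--   max2 = 0
--   max3 = 0
--   for x in lista:
--     if x > max1:
--       max3 = max2
--       max2 = max1
--       max1 = x
--     elif x > max2:
--       max3 = max2
--       max2 = x
--     elif x > max3:
--       max3 = x
--   return max1 + max2 + max3
-- ===== SOURCE B (Python) =====
-- def top_max3_list(lista):
--   pos = [x for x in lista if x > 0]
--   return sum(sorted(pos, reverse=True)[:3])
-- ===== Notes on version B (the rewrite author's own statement) =====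
-- stated objective: simpler
-- what changed: Replaces the hand-rolled three-accumulator branch cascade with filter-positives, sort descending, sum the first three.
import Mathlib
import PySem

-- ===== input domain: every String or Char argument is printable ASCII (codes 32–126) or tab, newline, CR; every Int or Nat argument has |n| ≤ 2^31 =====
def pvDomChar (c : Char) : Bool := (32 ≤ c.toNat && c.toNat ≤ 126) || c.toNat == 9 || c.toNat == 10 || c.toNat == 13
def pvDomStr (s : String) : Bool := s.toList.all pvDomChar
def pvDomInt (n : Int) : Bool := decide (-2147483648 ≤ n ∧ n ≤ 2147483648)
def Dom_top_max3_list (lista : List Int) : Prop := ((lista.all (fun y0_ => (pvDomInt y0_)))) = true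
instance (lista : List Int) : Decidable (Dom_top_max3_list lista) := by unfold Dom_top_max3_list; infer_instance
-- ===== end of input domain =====

-- B replaces A's three-accumulator branch cascade by filter-positives / sort-descending / sum-of-first-three (simpler, not faster).

-- ===== PORT A =====
-- loop body of A: update the three running maxima
def stepA (s : Int × Int × Int) (x : Int) : Int × Int × Int :=
  if x > s.1 then (x, s.1, s.2.1)
  else if x > s.2.1 then (s.1, x, s.2.1)
  else if x > s.2.2 then (s.1, s.2.1, x)
  else s

def top_max3_list (lista : List Int) : Int :=
  let s := lista.foldl stepA (0, 0, 0)
  s.1 + s.2.1 + s.2.2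

-- ===== PORT B =====
def top_max3_list_alt (lista : List Int) : Int :=
  let pos := lista.filter (fun x => decide (x > 0))
  ((PySem.List.sorted pos (fun x => x) true).take 3).sum

-- ===== PRECONDITION & SPEC =====
def Spec_top_max3_list (lista : List Int) (out : Int) : Prop := out = top_max3_list_alt lista
instance (lista : List Int) (out : Int) : Decidable (Spec_top_max3_list lista out) := by unfold Spec_top_max3_list; infer_instance

-- ===== CLAIM (what is proved, stated in full; the proofs are below) =====
def Claim_equal_top_max3_list : Prop := ∀ (lista : List Int), Dom_top_max3_list lista → Spec_top_max3_list lista (top_max3_list lista)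

-- ===== LEMMAS AND PROOFS =====

lemma stepA_rcomm : ∀ (s : Int × Int × Int) (x y : Int),
    stepA (stepA s x) y = stepA (stepA s y) x := by
  intro s x y
  obtain ⟨a, b, c⟩ := s
  simp only [stepA]
  split_ifs <;> simp_all [Prod.mk.injEq] <;> omega

-- folding the loop body over a descending list of positives yields its first three elements (0-padded)
lemma fold_desc (ds : List Int) (hp : ds.Pairwise (fun a b => b ≤ a))
    (hpos : ∀ x ∈ ds, 0 < x) :
    ds.foldl stepA (0, 0, 0) = (ds.getD 0 0, ds.getD 1 0, ds.getD 2 0) := by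
  induction ds using List.reverseRecOn with
  | nil => rfl
  | append_singleton ds' d ih =>
    rw [List.pairwise_append] at hp
    obtain ⟨hp', -, hle⟩ := hp
    have hled : ∀ x ∈ ds', d ≤ x := fun x hx => hle x hx d (by simp)
    have hd : 0 < d := hpos d (by simp)
    have := ih hp' (fun x hx => hpos x (by simp [hx]))
    rw [List.foldl_append, this]
    rcases ds' with _ | ⟨a, _ | ⟨b, _ | ⟨c, t⟩⟩⟩
    · simp [stepA, List.getD, hd]
    · have hda := hled a (by simp)
      simp [stepA, List.getD, hd, not_lt.mpr hda]
    · have hda := hled a (by simp)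
      have hdb := hled b (by simp)
      simp [stepA, List.getD, hd, not_lt.mpr hda, not_lt.mpr hdb]
    · have hda := hled a (by simp)
      have hdb := hled b (by simp)
      have hdc := hled c (by simp)
      simp [stepA, List.getD, not_lt.mpr hda, not_lt.mpr hdb, not_lt.mpr hdc]

-- non-positive elements never change a non-negative state
lemma fold_nonpos (ns : List Int) (h : ∀ x ∈ ns, x ≤ 0) (a b c : Int)
    (ha : 0 ≤ a) (hb : 0 ≤ b) (hc : 0 ≤ c) :
    ns.foldl stepA (a, b, c) = (a, b, c) := by
  induction ns with
  | nil => rfl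
  | cons x xs ih =>
    have hx : x ≤ 0 := h x (by simp)
    have hstep : stepA (a, b, c) x = (a, b, c) := by
      simp [stepA, not_lt.mpr (le_trans hx ha), not_lt.mpr (le_trans hx hb),
        not_lt.mpr (le_trans hx hc)]
    simpa [hstep] using ih (fun y hy => h y (by simp [hy]))

lemma take3_sum (ds : List Int) :
    (ds.take 3).sum = ds.getD 0 0 + ds.getD 1 0 + ds.getD 2 0 := by
  rcases ds with _ | ⟨a, _ | ⟨b, _ | ⟨c, t⟩⟩⟩ <;> simp [List.getD] <;> ring

lemma getD_nonneg (ds : List Int) (hpos : ∀ x ∈ ds, 0 < x) (i : ℕ) :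
    0 ≤ ds.getD i 0 := by
  by_cases h : i < ds.length
  · rw [List.getD_eq_getElem _ _ h]
    exact le_of_lt (hpos _ (ds.getElem_mem h))
  · rw [List.getD_eq_default _ _ (not_lt.mp h)]

-- ===== VERDICT (by name: the statement is the Claim_ definition above) =====
theorem top_max3_list_spec : Claim_equal_top_max3_list := by
  intro lista _
  unfold Spec_top_max3_list top_max3_list top_max3_list_alt
  set pos := lista.filter (fun x => decide (x > 0)) with hpos_def
  set ds := PySem.List.sorted pos (fun x => x) true with hds_def
  set ns := lista.filter (fun x => !decide (x > 0)) with hns_def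
  have hperm : lista.Perm (ds ++ ns) := by
    have h1 : (pos ++ ns).Perm lista := List.filter_append_perm _ lista
    exact (h1.symm.trans (((PySem.List.sorted_perm ..).symm : pos.Perm ds).append_right ns)).symm.symm
      |>.symm.symm
  have hdpos : ∀ x ∈ ds, 0 < x := by
    intro x hx
    have : x ∈ pos := (PySem.List.mem_sorted ..).mp hx
    simpa using (List.mem_filter.mp this).2
  have hdesc : ds.Pairwise (fun a b => b ≤ a) := by
    simpa using PySem.List.sorted_pairwise_rev (xs := pos) (key := fun x => x)
  have hns : ∀ x ∈ ns, x ≤ 0 := by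
    intro x hx
    have := (List.mem_filter.mp hx).2
    simp at this
    omega
  have hfold : lista.foldl stepA (0, 0, 0) = (ds ++ ns).foldl stepA (0, 0, 0) :=
    hperm.foldl_eq' (fun x _ y _ z => stepA_rcomm z x y) _
  rw [hfold, List.foldl_append, fold_desc ds hdesc hdpos,
    fold_nonpos ns hns _ _ _ (getD_nonneg ds hdpos 0) (getD_nonneg ds hdpos 1)
      (getD_nonneg ds hdpos 2), take3_sum]
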